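-- pv_equiv track=rewrite | github.com/jamilr/coderbyte_training | element_merger.py | element_merger
-- ===== SOURCE A (Python) =====
-- import collections
-- from typing import List
--
-- def element_merger(seq: List[int]) -> int:
--     n = len(seq)
--     q = collections.deque([])
--     for i in range(1, n):
--         q.append(abs(seq[i]-seq[i-1]))
--     while len(q) > 1:
--         m = len(q)
--         for j in range(1, m):
--             q.append(abs(q[j-1]-q[j]))
--             q.popleft()
--         q.popleft()
--     return q[0] if q else -1
-- ===== SOURCE B (Python) =====
-- from typing import List
--
-- def element_merger(seq: List[int]) -> int:
--     # Flat-array reformulation: one pass builds W = cur ++ new values via the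
--     # index-doubling recurrence W[m+k] = abs(W[2k] - W[2k+1]); no deque rotation.
--     cur = [abs(seq[i] - seq[i - 1]) for i in range(1, len(seq))]
--     if not cur:
--         return -1
--     while len(cur) > 1:
--         m = len(cur)
--         w = list(cur)
--         for k in range(m - 1):
--             w.append(abs(w[2 * k] - w[2 * k + 1]))
--         cur = w[m:]
--     return cur[0]
-- ===== Notes on version B (the rewrite author's own statement) =====
-- stated objective: alternative
-- what changed: Replaces the deque append/popleft rotation with a flat array grown in place by the index-doubling recurrence W[m+k] = abs(W[2k]-W[2k+1]), taking the tail slice W[m:] as the next level.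
import Mathlib
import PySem

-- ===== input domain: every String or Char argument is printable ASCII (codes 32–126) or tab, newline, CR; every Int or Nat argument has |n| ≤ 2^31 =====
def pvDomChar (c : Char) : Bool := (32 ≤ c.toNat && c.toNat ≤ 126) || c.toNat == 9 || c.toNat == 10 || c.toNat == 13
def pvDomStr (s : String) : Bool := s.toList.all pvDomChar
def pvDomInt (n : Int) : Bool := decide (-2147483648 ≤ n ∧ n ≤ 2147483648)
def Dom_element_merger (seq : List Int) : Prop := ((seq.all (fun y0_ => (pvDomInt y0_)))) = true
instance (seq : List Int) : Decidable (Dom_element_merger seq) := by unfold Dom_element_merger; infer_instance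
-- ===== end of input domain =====

-- B replaces A's deque append/popleft rotation with a flat array grown in place
-- by the index-doubling recurrence W[m+k] = |W[2k] - W[2k+1]|; alternative, same cost.
-- Loops are ported with an explicit fuel argument (always sufficient) purely to make them total.

-- ===== PORT A =====
-- for i in range(1, n): q.append(abs(seq[i]-seq[i-1]))   (indices are always in range, so getD's default is never used)
def emDiffsA (seq : List Int) : Nat → List Int → Nat → List Int
  | 0, q, _ => q
  | fuel+1, q, i =>
    if i < seq.length then
      emDiffsA seq fuel (q ++ [|seq.getD i 0 - seq.getD (i-1) 0|]) (i+1)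
    else q

-- inner loop: for j in range(1, m): q.append(abs(q[j-1]-q[j])); q.popleft()
def emInnerA : Nat → List Int → Nat → Nat → List Int
  | 0, q, _, _ => q
  | fuel+1, q, j, m =>
    if j < m then
      emInnerA fuel ((q ++ [|q.getD (j-1) 0 - q.getD j 0|]).drop 1) (j+1) m
    else q

-- while len(q) > 1: <inner loop>; q.popleft()
def emOuterA : Nat → List Int → List Int
  | 0, q => q
  | fuel+1, q =>
    if 1 < q.length then
      emOuterA fuel ((emInnerA q.length q 1 q.length).drop 1)
    else q

def element_merger (seq : List Int) : Int :=
  let q := emDiffsA seq seq.length [] 1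
  let r := emOuterA q.length q
  if r ≠ [] then r.getD 0 0 else -1

-- ===== PORT B =====
-- for k in range(m-1): w.append(abs(w[2*k]-w[2*k+1]))   (indices always in range)
def emGrowB : Nat → List Int → Nat → Nat → List Int
  | 0, w, _, _ => w
  | fuel+1, w, k, t =>
    if k < t then
      emGrowB fuel (w ++ [|w.getD (2*k) 0 - w.getD (2*k+1) 0|]) (k+1) t
    else w

-- while len(cur) > 1: build w; cur = w[m:]
def emOuterB : Nat → List Int → List Int
  | 0, cur => cur
  | fuel+1, cur =>
    if 1 < cur.length then
      emOuterB fuel ((emGrowB (cur.length - 1) cur 0 (cur.length - 1)).drop cur.length)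
    else cur

def element_merger_alt (seq : List Int) : Int :=
  let cur := (List.range' 1 (seq.length - 1)).map (fun i => |seq.getD i 0 - seq.getD (i-1) 0|)
  if cur = [] then -1 else (emOuterB cur.length cur).getD 0 0

-- ===== PRECONDITION & SPEC =====
def Spec_element_merger (seq : List Int) (out : Int) : Prop := out = element_merger_alt seq
instance (seq : List Int) (out : Int) : Decidable (Spec_element_merger seq out) := by unfold Spec_element_merger; infer_instance

-- ===== CLAIM (what is proved, stated in full; the proofs are below) =====
def Claim_equal_element_merger : Prop := ∀ (seq : List Int), Dom_element_merger seq → Spec_element_merger seq (element_merger seq)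

-- ===== LEMMAS AND PROOFS =====

lemma getD_drop (w : List Int) (t i : Nat) :
    (w.drop t).getD i 0 = w.getD (t + i) 0 := by
  simp [List.getD_eq_getElem?_getD, List.getElem?_drop]

lemma emDiffsA_eq (seq : List Int) : ∀ (f i : Nat) (q : List Int), seq.length - i ≤ f →
    emDiffsA seq f q i = q ++ (List.range' i (seq.length - i)).map
      (fun k => |seq.getD k 0 - seq.getD (k-1) 0|) := by
  intro f
  induction f with
  | zero =>
    intro i q h
    simp [emDiffsA, show seq.length - i = 0 by omega]
  | succ f ih =>
    intro i q h
    by_cases hi : i < seq.length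
    · rw [emDiffsA, if_pos hi, ih (i+1) _ (by omega)]
      rw [show seq.length - i = (seq.length - (i+1)) + 1 by omega, List.range'_succ]
      simp
    · rw [emDiffsA, if_neg hi]
      simp [show seq.length - i = 0 by omega]

-- the inner-loop simulation: after t steps A's deque is the tail slice (drop t) of B's flat array
lemma sim (m : Nat) : ∀ (d t : Nat) (w : List Int), d = m - 1 - t →
    w.length = m + t → t + 1 ≤ m →
    emInnerA (m - t) (w.drop t) (t+1) m = (emGrowB (m - 1 - t) w t (m-1)).drop (m-1) := by
  intro d
  induction d with
  | zero =>
    intro t w hd hw ht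
    have ht' : t = m - 1 := by omega
    rw [show m - t = 1 by omega, show m - 1 - t = 0 by omega]
    rw [emInnerA, if_neg (show ¬ t + 1 < m by omega), ht']
    rfl
  | succ d ih =>
    intro t w hd hw ht
    have htm : t + 1 < m := by omega
    rw [show m - t = (m - (t+1)) + 1 by omega, emInnerA, if_pos htm]
    have hg1 : (w.drop t).getD (t+1-1) 0 = w.getD (2*t) 0 := by
      rw [getD_drop]; congr 1; omega
    have hg2 : (w.drop t).getD (t+1) 0 = w.getD (2*t+1) 0 := by
      rw [getD_drop]; congr 1; omega
    set v : Int := |w.getD (2*t) 0 - w.getD (2*t+1) 0| with hv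
    have hstep : (w.drop t ++ [v]).drop 1 = (w ++ [v]).drop (t+1) := by
      rw [List.drop_append_of_le_length (show 1 ≤ (w.drop t).length by simp; omega)]
      rw [List.drop_drop, List.drop_append_of_le_length (show t + 1 ≤ w.length by omega)]
    rw [hg1, hg2, hstep]
    have hih := ih (t+1) (w ++ [v]) (by omega) (by simp; omega) (by omega)
    rw [hih]
    rw [show m - 1 - t = (m - 1 - (t+1)) + 1 by omega, emGrowB, if_pos (show t < m - 1 by omega)]

lemma emInnerA_length : ∀ (f : Nat) (q : List Int) (j m : Nat),
    (emInnerA f q j m).length = q.length := by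
  intro f
  induction f with
  | zero => intro q j m; rfl
  | succ f ih =>
    intro q j m
    by_cases h : j < m
    · rw [emInnerA, if_pos h, ih]
      simp
    · rw [emInnerA, if_neg h]

lemma outer_eq : ∀ (f : Nat) (q : List Int), emOuterA f q = emOuterB f q := by
  intro f
  induction f with
  | zero => intro q; rfl
  | succ f ih =>
    intro q
    by_cases h : 1 < q.length
    · rw [emOuterA, if_pos h, emOuterB, if_pos h]
      have hsim := sim q.length (q.length - 1) 0 q (by omega) (by omega) (by omega)
      simp only [List.drop_zero, Nat.sub_zero] at hsim
      set G := emGrowB (q.length - 1) q 0 (q.length - 1) with hG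
      have harg : (G.drop (q.length - 1)).drop 1 = G.drop q.length := by
        rw [List.drop_drop]
        congr 1
        omega
      rw [hsim, harg, ih]
    · rw [emOuterA, if_neg h, emOuterB, if_neg h]

lemma emOuterA_ne_nil : ∀ (f : Nat) (q : List Int), q ≠ [] → emOuterA f q ≠ [] := by
  intro f
  induction f with
  | zero => intro q h; exact h
  | succ f ih =>
    intro q h
    by_cases h1 : 1 < q.length
    · rw [emOuterA, if_pos h1]
      apply ih
      have hl : ((emInnerA q.length q 1 q.length).drop 1).length = q.length - 1 := by
        simp [emInnerA_length]
      intro hc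
      rw [hc] at hl
      simp at hl
      omega
    · rw [emOuterA, if_neg h1]; exact h

-- ===== VERDICT (by name: the statement is the Claim_ definition above) =====
theorem element_merger_spec : Claim_equal_element_merger := by
  intro seq _
  unfold Spec_element_merger element_merger element_merger_alt
  simp only
  rw [emDiffsA_eq seq seq.length 1 [] (by omega)]
  simp only [List.nil_append]
  set cur := (List.range' 1 (seq.length - 1)).map
      (fun k => |seq.getD k 0 - seq.getD (k-1) 0|) with hcur
  by_cases hc : cur = []
  · simp [hc, emOuterA]
  · rw [if_neg hc, if_pos (emOuterA_ne_nil cur.length cur hc), outer_eq]
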